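-- pv_equiv track=rewrite | github.com/chloelawson/Plupy | plupy.py | channel_cleaner
-- ===== SOURCE A (Python) =====
-- def channel_cleaner(cha_info):
--     """
--     DESCRIPTION:
--         takes an array of 4 digit code for channels sending the pulse and returns the
--         channels that sent the triggers
--
--     PARAMETERS:
--         cha_info(array): Array containg the code for the channels [   xxxx xxxx xxxx xxxx ...]
--
--     RETURNS
--         cha_clean: List of the channels received in order correspondent to the counts
--
--         (counts1, ...): tupple containing the number of counts each channel received
--     """
--
--     cha_clean = []
--     counts_1 = 0
--     counts_2 = 0
--     counts_3 = 0
--     counts_4 = 0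
--
--     # Converting from the 4 digits to channels
--     for cha_list in cha_info:
--         channel = []
--         if cha_list[0] == '1':
--             channel.append('CH4')
--             counts_4 += 1
--
--         if cha_list[1] == '1':
--             channel.append('CH3')
--             counts_3 += 1
--
--         if cha_list[2] == '1':
--             channel.append('CH2')
--             counts_2 += 1
--
--         if cha_list[3] == '1':
--             channel.append('CH1')
--             counts_1 += 1
--
--         cha_clean.append(channel)
--
--     return cha_clean, (counts_1, counts_2, counts_3, counts_4)
-- ===== SOURCE B (Python) =====
-- def channel_cleaner(cha_info):
--     # Two-pass decomposition: build the label rows in one pass, then compute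
--     # each channel's count as a separate column total over cha_info.
--     labels = ['CH4', 'CH3', 'CH2', 'CH1']
--     cha_clean = [[lab for bit, lab in zip(row, labels) if bit == '1']
--                  for row in cha_info]
--     counts_1 = sum(1 for row in cha_info if row[3] == '1')
--     counts_2 = sum(1 for row in cha_info if row[2] == '1')
--     counts_3 = sum(1 for row in cha_info if row[1] == '1')
--     counts_4 = sum(1 for row in cha_info if row[0] == '1')
--     return cha_clean, (counts_1, counts_2, counts_3, counts_4)
-- ===== Notes on version B (the rewrite author's own statement) =====
-- stated objective: alternative
-- what changed: Replaces A's single fused loop that accumulates labels and four counters together by two differently-shaped passes: a zip-with-labels comprehension building the label rows, then the counts recomputed as label-membership sums over the built rows.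
import Mathlib
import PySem

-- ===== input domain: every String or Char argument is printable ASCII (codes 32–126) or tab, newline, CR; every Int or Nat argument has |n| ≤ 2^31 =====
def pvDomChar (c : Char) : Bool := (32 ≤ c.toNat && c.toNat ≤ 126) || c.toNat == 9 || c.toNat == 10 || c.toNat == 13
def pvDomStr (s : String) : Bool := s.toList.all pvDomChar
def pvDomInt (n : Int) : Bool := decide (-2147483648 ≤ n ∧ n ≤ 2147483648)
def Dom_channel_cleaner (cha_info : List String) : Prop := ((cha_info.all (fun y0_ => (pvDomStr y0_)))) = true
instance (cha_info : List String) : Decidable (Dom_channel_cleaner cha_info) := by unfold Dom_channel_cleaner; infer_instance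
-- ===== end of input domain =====

-- B replaces A's single fused loop (labels + four counters at once) by two passes:
-- a zip-with-labels map building the label rows, then counts as label-membership sums.


-- ===== PORT A =====
def channelStepA (st : List (List String) × Int × Int × Int × Int) (cha_list : String) :
    List (List String) × Int × Int × Int × Int :=
  let (cha_clean, c1, c2, c3, c4) := st
  let channel : List String := []
  let (channel, c4) := if PySem.Str.pyGet? cha_list 0 = some '1' then (channel ++ ["CH4"], c4 + 1) else (channel, c4)
  let (channel, c3) := if PySem.Str.pyGet? cha_list 1 = some '1' then (channel ++ ["CH3"], c3 + 1) else (channel, c3)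
  let (channel, c2) := if PySem.Str.pyGet? cha_list 2 = some '1' then (channel ++ ["CH2"], c2 + 1) else (channel, c2)
  let (channel, c1) := if PySem.Str.pyGet? cha_list 3 = some '1' then (channel ++ ["CH1"], c1 + 1) else (channel, c1)
  (cha_clean ++ [channel], c1, c2, c3, c4)

def channel_cleaner (cha_info : List String) : List (List String) × (Int × Int × Int × Int) :=
  cha_info.foldl channelStepA ([], 0, 0, 0, 0)

-- ===== PORT B =====
-- one row of the comprehension: [lab for bit, lab in zip(row, labels) if bit == '1']
def altRow (row : String) : List String :=
  (row.toList.zip ["CH4", "CH3", "CH2", "CH1"]).filterMap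
    (fun bl => if bl.1 = '1' then some bl.2 else none)

-- sum(1 for row in cha_info if row[i] == '1'): one column's total
def colSum (i : Int) (cha_info : List String) : Int :=
  (cha_info.map (fun row => if PySem.Str.pyGet? row i = some '1' then (1 : Int) else 0)).sum

def channel_cleaner_alt (cha_info : List String) : List (List String) × (Int × Int × Int × Int) :=
  let cha_clean := cha_info.map altRow
  (cha_clean, colSum 3 cha_info, colSum 2 cha_info, colSum 1 cha_info, colSum 0 cha_info)

-- ===== PRECONDITION & SPEC =====
-- A indexes cha_list[0..3] unconditionally, so it raises IndexError on any code string
-- shorter than 4 characters; Pre_ admits exactly the inputs where A returns.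
def Pre_channel_cleaner (cha_info : List String) : Prop :=
  ∀ s ∈ cha_info, 4 ≤ s.toList.length
instance (cha_info : List String) : Decidable (Pre_channel_cleaner cha_info) := by
  unfold Pre_channel_cleaner; infer_instance
def pvWitness_channel_cleaner : List String := ["1010", "0001", "1111", "0000"]

def Spec_channel_cleaner (cha_info : List String) (out : List (List String) × (Int × Int × Int × Int)) : Prop := out = channel_cleaner_alt cha_info
instance (cha_info : List String) (out : List (List String) × (Int × Int × Int × Int)) : Decidable (Spec_channel_cleaner cha_info out) := by unfold Spec_channel_cleaner; infer_instance

-- ===== CLAIM (what is proved, stated in full; the proofs are below) =====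
def Claim_equal_channel_cleaner : Prop := ∀ (cha_info : List String), Dom_channel_cleaner cha_info → Pre_channel_cleaner cha_info → Spec_channel_cleaner cha_info (channel_cleaner cha_info)

-- ===== LEMMAS AND PROOFS =====
lemma colSum_cons (i : Int) (x : String) (xs : List String) :
    colSum i (x :: xs) = (if PySem.Str.pyGet? x i = some '1' then (1 : Int) else 0) + colSum i xs := by
  simp [colSum]

lemma stepA_eq (st : List (List String) × Int × Int × Int × Int) (row : String)
    (h : 4 ≤ row.toList.length) :
    channelStepA st row =
      (st.1 ++ [altRow row],
       st.2.1 + (if PySem.Str.pyGet? row 3 = some '1' then 1 else 0),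
       st.2.2.1 + (if PySem.Str.pyGet? row 2 = some '1' then 1 else 0),
       st.2.2.2.1 + (if PySem.Str.pyGet? row 1 = some '1' then 1 else 0),
       st.2.2.2.2 + (if PySem.Str.pyGet? row 0 = some '1' then 1 else 0)) := by
  obtain ⟨acc, c1, c2, c3, c4⟩ := st
  obtain ⟨a, b, c, d, t, ht⟩ : ∃ a b c d t, row.toList = a :: b :: c :: d :: t := by
    match hl : row.toList, h with
    | a :: b :: c :: d :: t, _ => exact ⟨a, b, c, d, t, rfl⟩
  have hget : ∀ i : Int, PySem.Str.pyGet? row i = PySem.List.pyGet? row.toList i := by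
    intro i; simp [PySem.Str.pyGet?]
  have h0 : PySem.List.pyGet? (a :: b :: c :: d :: t) 0 = some a := by
    simp [pysem]
  have h1 : PySem.List.pyGet? (a :: b :: c :: d :: t) 1 = some b := by
    simp [pysem]
  have h2 : PySem.List.pyGet? (a :: b :: c :: d :: t) 2 = some c := by
    simp [pysem]
  have h3 : PySem.List.pyGet? (a :: b :: c :: d :: t) 3 = some d := by
    simp [pysem]
  simp only [channelStepA, hget, ht, altRow, h0, h1, h2, h3, Option.some.injEq]
  by_cases ha : a = '1' <;> by_cases hb : b = '1' <;> by_cases hc : c = '1' <;> by_cases hd : d = '1' <;>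
    simp [ha, hb, hc, hd]

lemma foldA_eq (l : List String) (acc : List (List String)) (c1 c2 c3 c4 : Int)
    (hpre : ∀ s ∈ l, 4 ≤ s.toList.length) :
    l.foldl channelStepA (acc, c1, c2, c3, c4) =
      (acc ++ l.map altRow,
       c1 + colSum 3 l, c2 + colSum 2 l, c3 + colSum 1 l, c4 + colSum 0 l) := by
  induction l generalizing acc c1 c2 c3 c4 with
  | nil => simp [colSum]
  | cons x xs ih =>
    rw [List.foldl_cons, stepA_eq _ _ (hpre x (by simp))]
    rw [ih _ _ _ _ _ (fun s hs => hpre s (by simp [hs]))]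
    simp [colSum_cons]
    and_intros <;> ring

-- ===== VERDICT (by name: the statement is the Claim_ definition above) =====
theorem channel_cleaner_spec : Claim_equal_channel_cleaner := by
  intro cha_info _ hpre
  unfold Spec_channel_cleaner channel_cleaner channel_cleaner_alt
  rw [foldA_eq _ _ _ _ _ _ hpre]
  simp
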